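-- pv_equiv track=rewrite | github.com/pypi-data/pypi-mirror-373 | packages/SSDraw/ssdraw-0.2.0-py3-none-any.whl/SSDraw/core.py | coords2path
-- ===== SOURCE A (Python) =====
-- import typing as T
--
-- def coords2path(
--     coord_set1: T.List[T.Any],
-- ) -> T.Tuple[T.List[T.Any], T.List[int]]:
--     coords_f1 = []
--     instructions1 = []
--
--     for c in coord_set1:
--         for n in range(len(c)):
--             coords_f1.append(c[n])
--             if n == 0:
--                 instructions1.append(1)
--             else:
--                 instructions1.append(2)
--
--     return coords_f1, instructions1
-- ===== SOURCE B (Python) =====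
-- def coords2path(coord_set1):
--     # Flatten while recording the start offset of each non-empty group,
--     # then build the instruction array as all 2s and mark the recorded
--     # start positions with 1.
--     coords_f1 = []
--     starts = []
--     for group in coord_set1:
--         if group:
--             starts.append(len(coords_f1))
--             coords_f1 += group
--     instructions1 = [2] * len(coords_f1)
--     for s in starts:
--         instructions1[s] = 1
--     return coords_f1, instructions1
-- ===== Notes on version B (the rewrite author's own statement) =====
-- stated objective: alternative
-- what changed: Instead of emitting a move/line code per element while flattening, B records each non-empty group's start offset during the flatten, pre-fills the instruction list with 2s, and overwrites the recorded start positions with 1.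
import Mathlib
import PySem

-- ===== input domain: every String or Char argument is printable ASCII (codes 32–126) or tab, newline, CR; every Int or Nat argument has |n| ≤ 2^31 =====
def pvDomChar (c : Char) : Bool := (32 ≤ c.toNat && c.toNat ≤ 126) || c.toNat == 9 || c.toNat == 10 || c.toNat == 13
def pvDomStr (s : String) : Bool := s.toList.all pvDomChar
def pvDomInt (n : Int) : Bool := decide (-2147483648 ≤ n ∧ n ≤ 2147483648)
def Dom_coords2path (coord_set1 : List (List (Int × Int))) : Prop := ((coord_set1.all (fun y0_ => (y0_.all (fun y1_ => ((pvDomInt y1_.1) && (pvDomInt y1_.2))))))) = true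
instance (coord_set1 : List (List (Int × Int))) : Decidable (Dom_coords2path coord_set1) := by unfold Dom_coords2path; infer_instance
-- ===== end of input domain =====

-- B records each non-empty group's start offset while flattening, pre-fills the
-- instruction list with 2s and overwrites the recorded start positions with 1,
-- instead of A's per-element move/line branch (objective: alternative).

-- ===== PORT A =====
-- Port of A: element-by-element loop over each group's indices via enumerate, branching on n == 0.
def coords2path (coord_set1 : List (List (Int × Int))) : (List (Int × Int)) × List Int :=
  coord_set1.foldl (fun acc c =>
    (PySem.List.enumerate c 0).foldl (fun (p : List (Int × Int) × List Int) nc =>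
      (p.1 ++ [nc.2], p.2 ++ [if nc.1 == 0 then (1 : Int) else 2])) acc) ([], [])

-- ===== PORT B =====
-- Port of B: flatten while recording start offsets of non-empty groups, then
-- fill the instruction list with 2s and set each recorded position to 1.
-- (Python's `instructions1[s] = 1` with s a recorded non-negative in-range
-- length is List.set at s.toNat — exact here since every s is a prefix length.)
def coords2path_alt (coord_set1 : List (List (Int × Int))) : (List (Int × Int)) × List Int :=
  let p := coord_set1.foldl (fun (p : List (Int × Int) × List Int) group =>
    if group.isEmpty then p
    else (p.1 ++ group, p.2 ++ [(p.1.length : Int)])) ([], [])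
  (p.1, p.2.foldl (fun ins s => ins.set s.toNat (1 : Int)) (List.replicate p.1.length (2 : Int)))

-- ===== PRECONDITION & SPEC =====
def Spec_coords2path (coord_set1 : List (List (Int × Int))) (out : (List (Int × Int)) × List Int) : Prop := out = coords2path_alt coord_set1
instance (coord_set1 : List (List (Int × Int))) (out : (List (Int × Int)) × List Int) : Decidable (Spec_coords2path coord_set1 out) := by unfold Spec_coords2path; infer_instance

-- ===== CLAIM (what is proved, stated in full; the proofs are below) =====
def Claim_equal_coords2path : Prop := ∀ (coord_set1 : List (List (Int × Int))), Dom_coords2path coord_set1 → Spec_coords2path coord_set1 (coords2path coord_set1)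

-- ===== LEMMAS AND PROOFS =====

-- Instruction blocks of all groups, recursively (the common normal form).
def pvBlocks : List (List (Int × Int)) → List Int
  | [] => []
  | c :: cs => (if c.isEmpty then [] else 1 :: List.replicate (c.length - 1) (2 : Int)) ++ pvBlocks cs

-- Relative start offsets of the non-empty groups.
def pvStarts : List (List (Int × Int)) → List Int
  | [] => []
  | c :: cs => if c.isEmpty then pvStarts cs
               else (0 : Int) :: (pvStarts cs).map (· + (c.length : Int))

-- A's inner loop with all indices ≥ 1: every element appends a 2.
lemma inner_loop_pos (c : List (Int × Int)) (s : Int) (hs : 1 ≤ s)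
    (acc : List (Int × Int) × List Int) :
    (PySem.List.enumerate c s).foldl (fun (p : List (Int × Int) × List Int) nc =>
      (p.1 ++ [nc.2], p.2 ++ [if nc.1 == 0 then (1 : Int) else 2])) acc
    = (acc.1 ++ c, acc.2 ++ List.replicate c.length (2 : Int)) := by
  induction c generalizing s acc with
  | nil => simp [PySem.List.enumerate_nil]
  | cons x xs ih =>
      have hne : (s == 0) = false := by simp; omega
      simp only [PySem.List.enumerate_cons, List.foldl_cons]
      rw [ih (s + 1) (by omega)]
      simp [hne, List.replicate_succ]

-- A's inner loop starting at 0 over one group appends that group's block.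
lemma inner_loop_zero (c : List (Int × Int)) (acc : List (Int × Int) × List Int) :
    (PySem.List.enumerate c 0).foldl (fun (p : List (Int × Int) × List Int) nc =>
      (p.1 ++ [nc.2], p.2 ++ [if nc.1 == 0 then (1 : Int) else 2])) acc
    = (acc.1 ++ c,
       acc.2 ++ (if c.isEmpty then [] else 1 :: List.replicate (c.length - 1) (2 : Int))) := by
  cases c with
  | nil => simp [PySem.List.enumerate_nil]
  | cons x xs =>
      simp only [PySem.List.enumerate_cons, List.foldl_cons]
      rw [inner_loop_pos xs (0 + 1) (by omega)]
      simp

-- A's outer loop computes (flatten, blocks).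
lemma a_loop (cs : List (List (Int × Int))) (acc : List (Int × Int) × List Int) :
    cs.foldl (fun acc c =>
      (PySem.List.enumerate c 0).foldl (fun (p : List (Int × Int) × List Int) nc =>
        (p.1 ++ [nc.2], p.2 ++ [if nc.1 == 0 then (1 : Int) else 2])) acc) acc
    = (acc.1 ++ cs.flatMap (fun g => g), acc.2 ++ pvBlocks cs) := by
  induction cs generalizing acc with
  | nil => simp [pvBlocks]
  | cons c cs ih =>
      simp only [List.foldl_cons]
      rw [inner_loop_zero, ih]
      simp [pvBlocks, List.append_assoc]

-- B's first fold computes (flatten, absolute starts).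
lemma b_fold (cs : List (List (Int × Int))) (a : List (Int × Int)) (b : List Int) :
    cs.foldl (fun (p : List (Int × Int) × List Int) group =>
      if group.isEmpty then p
      else (p.1 ++ group, p.2 ++ [(p.1.length : Int)])) (a, b)
    = (a ++ cs.flatMap (fun g => g), b ++ (pvStarts cs).map (· + (a.length : Int))) := by
  induction cs generalizing a b with
  | nil => simp [pvStarts]
  | cons c cs ih =>
      cases c with
      | nil => simpa [pvStarts] using ih a b
      | cons x xs =>
          simp only [List.foldl_cons, List.isEmpty_cons, Bool.false_eq_true, if_false]
          rw [ih]
          simp only [pvStarts, List.isEmpty_cons, Bool.false_eq_true, if_false,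
            List.flatMap_cons, List.map_cons, Prod.mk.injEq]
          refine ⟨by simp [List.append_assoc], ?_⟩
          rw [zero_add, ← List.append_cons, List.map_map]
          congr 1
          congr 1
          apply List.map_congr_left
          intro s _
          simp [Function.comp, List.length_append, List.length_cons]
          ring

-- B's marking loop rebuilds the blocks from the 2-filled array.
lemma set_loop (cs : List (List (Int × Int))) (pre : List Int) :
    ((pvStarts cs).map (· + (pre.length : Int))).foldl
      (fun ins s => ins.set s.toNat (1 : Int))
      (pre ++ List.replicate (cs.flatMap (fun g => g)).length (2 : Int))
    = pre ++ pvBlocks cs := by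
  induction cs generalizing pre with
  | nil => simp [pvStarts, pvBlocks]
  | cons c cs ih =>
      cases c with
      | nil => simpa [pvStarts, pvBlocks] using ih pre
      | cons x xs =>
          simp only [pvStarts, List.isEmpty_cons, if_neg (by simp : ¬ (false = true)),
            List.map_cons, List.foldl_cons, List.map_map]
          have hset :
              ((pre ++ List.replicate (((x :: xs) :: cs).flatMap (fun g => g)).length (2 : Int)).set
                ((0 + (pre.length : Int)).toNat) (1 : Int))
              = (pre ++ (1 : Int) :: List.replicate xs.length (2 : Int))
                  ++ List.replicate (cs.flatMap (fun g => g)).length (2 : Int) := by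
            have h0 : ((0 : Int) + (pre.length : Int)).toNat = pre.length := by omega
            rw [h0, List.set_append_right _ _ (le_refl pre.length)]
            simp [List.replicate_succ, List.replicate_append_replicate, List.append_assoc]
          rw [hset]
          have hm : ((pvStarts cs).map ((fun t => t + ((pre.length : Nat) : Int)) ∘
                (fun s => s + (((x :: xs).length : Nat) : Int))))
              = (pvStarts cs).map
                  (· + (((pre ++ (1 : Int) :: List.replicate xs.length 2).length : Nat) : Int)) := by
            apply List.map_congr_left
            intro s _
            simp [Function.comp, List.length_append, List.length_cons, List.length_replicate]
            ring
          rw [hm, ih (pre ++ (1 : Int) :: List.replicate xs.length 2)]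
          simp [pvBlocks, List.append_assoc]

-- ===== VERDICT (by name: the statement is the Claim_ definition above) =====
theorem coords2path_spec : Claim_equal_coords2path := by
  intro cs _
  show coords2path cs = coords2path_alt cs
  unfold coords2path coords2path_alt
  rw [a_loop, b_fold]
  simp only [List.nil_append, List.length_nil, Nat.cast_zero]
  have : ((pvStarts cs).map (· + (0 : Int))).foldl
      (fun ins s => ins.set s.toNat (1 : Int))
      (List.replicate (cs.flatMap (fun g => g)).length (2 : Int))
      = pvBlocks cs := by
    have h := set_loop cs []
    simpa using h
  simp only [this]
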